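-- pv_equiv track=rewrite | github.com/dev7796/Othello_Game | mp520.py | hor_left
-- ===== SOURCE A (Python) =====
-- def hor_left(state, player, cr, cc):
--     tr = len(state)
--     tc = len(state[0])
--     bpos = -1
--     for i in range(cc-1, -1, -1):
--         if state[cr][i] == ' ':
--             break
--         if state[cr][i] == player:
--             bpos = i
--             break
--     if bpos != -1:
--         return abs(cc-bpos)-1
--     else:
--         return 0
-- ===== SOURCE B (Python) =====
-- def hor_left(state, player, cr, cc):
--     if cc <= 0:
--         return 0
--     seg = state[cr][:cc][::-1]
--     b = seg.index(' ') if ' ' in seg else len(seg)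
--     p = seg.index(player) if player in seg else None
--     return p if p is not None and p < b else 0
-- ===== Notes on version B (the rewrite author's own statement) =====
-- stated objective: simpler
-- what changed: Replaces A's break-driven right-to-left index walk with slicing out the reversed left segment and comparing the first-occurrence positions of the player piece and of blank.
import Mathlib
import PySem

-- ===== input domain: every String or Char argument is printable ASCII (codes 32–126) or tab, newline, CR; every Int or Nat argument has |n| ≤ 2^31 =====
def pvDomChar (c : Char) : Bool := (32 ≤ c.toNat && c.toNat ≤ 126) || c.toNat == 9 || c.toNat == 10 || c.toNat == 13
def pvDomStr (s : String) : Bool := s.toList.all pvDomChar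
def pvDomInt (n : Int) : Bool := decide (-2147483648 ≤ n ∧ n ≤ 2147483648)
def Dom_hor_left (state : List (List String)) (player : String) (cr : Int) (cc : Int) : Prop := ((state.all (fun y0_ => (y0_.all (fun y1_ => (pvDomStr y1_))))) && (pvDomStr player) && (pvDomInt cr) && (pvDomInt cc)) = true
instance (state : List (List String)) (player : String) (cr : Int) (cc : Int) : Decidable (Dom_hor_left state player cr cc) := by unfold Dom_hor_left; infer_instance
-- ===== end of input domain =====

-- B replaces A's break-driven right-to-left index walk by slicing out the reversed left
-- segment and comparing the first-occurrence positions of the player piece and of blank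
-- (objective: simpler decomposition, same cost).

-- ===== PORT A =====
-- the break-driven for-loop of A: first blank → break (-1), first player piece → break (its index)
def horLeftLoop (row : List String) (player : String) : List Int → Int
  | [] => -1
  | i :: rest =>
    match PySem.List.pyGet? row i with
    | none => -1  -- IndexError in Python; excluded by Pre_hor_left
    | some s =>
      if s == " " then -1
      else if s == player then i
      else horLeftLoop row player rest

def hor_left (state : List (List String)) (player : String) (cr : Int) (cc : Int) : Int :=
  match state with
  | [] => 0  -- len(state[0]) raises IndexError in Python; excluded by Pre_hor_left
  | r0 :: _ =>
    let _tr : Int := state.length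
    let _tc : Int := r0.length
    let row := PySem.List.pyGetD state cr []  -- state[cr]; Pre_ guarantees it is in range when read
    let bpos := horLeftLoop row player (PySem.List.pyRange (cc - 1) (-1) (-1))
    if bpos ≠ -1 then ((cc - bpos).natAbs : Int) - 1 else 0

-- ===== PORT B =====
def hor_left_alt (state : List (List String)) (player : String) (cr : Int) (cc : Int) : Int :=
  if cc ≤ 0 then 0
  else
    let row := PySem.List.pyGetD state cr []  -- state[cr]; Pre_ guarantees it is in range here
    let seg := (PySem.List.slice? (PySem.List.slice row none (some cc)) none none (-1)).getD []  -- state[cr][:cc][::-1]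
    let b : Nat := (PySem.List.index? seg " ").getD seg.length
    match PySem.List.index? seg player with
    | some p => if p < b then (p : Int) else 0
    | none => 0

-- ===== PRECONDITION & SPEC =====
-- Pre_ excludes exactly the inputs where Python A raises IndexError: empty state
-- (len(state[0])), and, when the loop runs (cc > 0), cr out of range or cc beyond the row length.
def Pre_hor_left (state : List (List String)) (player : String) (cr : Int) (cc : Int) : Prop :=
  state ≠ [] ∧ (cc ≤ 0 ∨ (PySem.Raise.InRange state.length cr ∧ cc ≤ ((PySem.List.pyGetD state cr []).length : Int)))
instance (state : List (List String)) (player : String) (cr : Int) (cc : Int) : Decidable (Pre_hor_left state player cr cc) := by unfold Pre_hor_left; infer_instance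

def pvWitness_hor_left : List (List String) × String × Int × Int := ([["x", "o", " "], ["o", "x", "x"]], "x", 1, 2)

def Spec_hor_left (state : List (List String)) (player : String) (cr : Int) (cc : Int) (out : Int) : Prop := out = hor_left_alt state player cr cc
instance (state : List (List String)) (player : String) (cr : Int) (cc : Int) (out : Int) : Decidable (Spec_hor_left state player cr cc out) := by unfold Spec_hor_left; infer_instance

-- ===== CLAIM (what is proved, stated in full; the proofs are below) =====
def Claim_equal_hor_left : Prop := ∀ (state : List (List String)) (player : String) (cr : Int) (cc : Int), Dom_hor_left state player cr cc → Pre_hor_left state player cr cc → Spec_hor_left state player cr cc (hor_left state player cr cc)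

-- ===== LEMMAS AND PROOFS =====

theorem index?_lt_length {α : Type} [BEq α] [LawfulBEq α] {xs : List α} {v : α} {k : Nat}
    (h : PySem.List.index? xs v = some k) : k < xs.length := by
  obtain ⟨hk, _, _⟩ := PySem.List.getElem_of_index?_eq_some h
  exact hk

-- the loop invariant: walking the row right-to-left from index n-1 either never meets the
-- player piece strictly before a blank (result -1), or returns n-1-j where j is the
-- first-occurrence index of the player piece in the reversed prefix, before the first blank
theorem hl_inv (row : List String) (player : String) :
    ∀ n : Nat, n ≤ row.length →
    (horLeftLoop row player (PySem.List.pyRange ((n : Int) - 1) (-1) (-1)) = -1 ∧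
      ∀ p, PySem.List.index? ((row.take n).reverse) player = some p →
        (PySem.List.index? ((row.take n).reverse) " ").getD n ≤ p)
    ∨ (∃ j : Nat, PySem.List.index? ((row.take n).reverse) player = some j ∧
        j < (PySem.List.index? ((row.take n).reverse) " ").getD n ∧
        horLeftLoop row player (PySem.List.pyRange ((n : Int) - 1) (-1) (-1)) = (n : Int) - 1 - (j : Int)) := by
  intro n
  induction n with
  | zero =>
    intro _
    left
    rw [PySem.List.pyRange_neg_one_eq_nil (by norm_num)]
    refine ⟨rfl, ?_⟩
    intro p hp
    rw [(PySem.List.index?_eq_none_iff _ _).2 (by simp)] at hp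
    exact absurd hp (by simp)
  | succ n ih =>
    intro hle
    have hn : n < row.length := by omega
    have hx : row[n]? = some row[n] := List.getElem?_eq_getElem hn
    have hcast : ((n + 1 : Nat) : Int) - 1 = (n : Int) := by push_cast; ring
    have hrange : PySem.List.pyRange (((n + 1 : Nat) : Int) - 1) (-1) (-1)
        = (n : Int) :: PySem.List.pyRange ((n : Int) - 1) (-1) (-1) := by
      rw [hcast, PySem.List.pyRange_neg_one_cons (by omega)]
    have hseg : (row.take (n + 1)).reverse = row[n] :: (row.take n).reverse := by
      rw [List.take_add_one, hx]; simp
    have hget : PySem.List.pyGet? row ((n : Int)) = some row[n] := by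
      rw [PySem.List.pyGet?_natCast, hx]
    rw [hrange, hseg]
    simp only [horLeftLoop, hget]
    by_cases hb : row[n] == " "
    · -- blank: break
      left
      rw [if_pos hb]
      refine ⟨rfl, ?_⟩
      intro p hp
      have : PySem.List.index? (row[n] :: (row.take n).reverse) " " = some 0 := by
        rw [eq_of_beq hb]; exact PySem.List.index?_cons_self _ _
      rw [this]; simp
    · by_cases hp : row[n] == player
      · -- player piece found at the new head
        right
        refine ⟨0, ?_, ?_, ?_⟩
        · rw [eq_of_beq hp]; exact PySem.List.index?_cons_self _ _
        · rw [PySem.List.index?_cons_of_ne _ (by simpa using hb)]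
          cases hB : PySem.List.index? ((row.take n).reverse) " " with
          | none => simp
          | some b0 => simp
        · simp only [hb, if_neg, hp, if_pos, Bool.false_eq_true, not_false_iff]
          omega
      · -- neither: the loop continues; shift both first-occurrence indices by one
        simp only [hb, hp, if_neg, Bool.false_eq_true, not_false_iff]
        have hIH := ih (by omega)
        have hshiftP : PySem.List.index? (row[n] :: (row.take n).reverse) player
            = (PySem.List.index? ((row.take n).reverse) player).map (· + 1) :=
          PySem.List.index?_cons_of_ne _ (by simpa using hp)
        have hshiftB : (PySem.List.index? (row[n] :: (row.take n).reverse) " ").getD (n + 1)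
            = (PySem.List.index? ((row.take n).reverse) " ").getD n + 1 := by
          rw [PySem.List.index?_cons_of_ne _ (by simpa using hb)]
          cases hB : PySem.List.index? ((row.take n).reverse) " " with
          | none => simp
          | some b0 => simp
        rcases hIH with ⟨hL, hnone⟩ | ⟨j, hj, hjb, hL⟩
        · left
          refine ⟨hL, ?_⟩
          intro p hp'
          rw [hshiftP] at hp'
          cases hP : PySem.List.index? ((row.take n).reverse) player with
          | none => rw [hP] at hp'; simp at hp'
          | some p0 =>
            rw [hP] at hp'; simp at hp'
            have := hnone p0 hP
            rw [hshiftB]; omega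
        · right
          refine ⟨j + 1, ?_, ?_, ?_⟩
          · rw [hshiftP, hj]; rfl
          · rw [hshiftB]; omega
          · rw [hL]; push_cast; ring

-- ===== VERDICT (by name: the statement is the Claim_ definition above) =====
theorem hor_left_spec : Claim_equal_hor_left := by
  intro state player cr cc _ hpre
  obtain ⟨hne, hrest⟩ := hpre
  unfold Spec_hor_left hor_left hor_left_alt
  match state, hne with
  | r0 :: rest, _ =>
    by_cases hcc : cc ≤ 0
    · -- empty range: both return 0
      simp only [if_pos hcc]
      rw [PySem.List.pyRange_neg_one_eq_nil (by omega)]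
      simp [horLeftLoop]
    · simp only [if_neg hcc]
      rcases hrest with h | ⟨hin, hlen⟩
      · omega
      · set row := PySem.List.pyGetD (r0 :: rest) cr [] with hrow
        have hcc0 : 0 ≤ cc := by omega
        -- B's segment is the reversed take
        have hslice : PySem.List.slice row none (some cc) = row.take cc.toNat :=
          PySem.List.slice_to _ hcc0
        have hseg : (PySem.List.slice? (PySem.List.slice row none (some cc)) none none (-1)).getD []
            = (row.take cc.toNat).reverse := by
          rw [hslice, PySem.List.slice?_none_none_neg_one]; rfl
        have hccn : ((cc.toNat : Nat) : Int) = cc := Int.toNat_of_nonneg hcc0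
        have hnle : cc.toNat ≤ row.length := by omega
        have hseglen : ((row.take cc.toNat).reverse).length = cc.toNat := by
          simp [List.length_take]; omega
        have hinv := hl_inv row player cc.toNat hnle
        rw [hccn] at hinv
        rcases hinv with ⟨hL, hnone⟩ | ⟨j, hj, hjb, hL⟩
        · rw [hL]
          simp only [ne_eq, not_true_eq_false, if_false, hseg, hseglen]
          cases hP : PySem.List.index? ((row.take cc.toNat).reverse) player with
          | none => rfl
          | some p =>
            have := hnone p hP
            simp only []
            rw [if_neg (by omega)]
        · have hbub : (PySem.List.index? ((row.take cc.toNat).reverse) " ").getD cc.toNat ≤ cc.toNat := by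
            cases hB : PySem.List.index? ((row.take cc.toNat).reverse) " " with
            | none => simp
            | some b0 =>
              have := index?_lt_length hB
              rw [hseglen] at this
              simp; omega
          have hjlt : j < cc.toNat := by omega
          rw [hL]
          have hne1 : (cc : Int) - 1 - (j : Int) ≠ -1 := by omega
          rw [if_pos hne1, hseg, hseglen, hj]
          simp only []
          rw [if_pos hjb]
          have : (cc - (cc - 1 - (j : Int))).natAbs = j + 1 := by omega
          rw [this]
          push_cast; ring
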